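-- pv_equiv track=rewrite | github.com/Sia-Hu/cosc426 | labs/lab04/Lab4.py | getBigramFreqs
-- ===== SOURCE A (Python) =====
-- def getBigramFreqs(preprocessed_text:list, vocab:set) -> dict:
--     """
--     Args:
--         preprocessed_text: text that has been divided into sentences and tokens
--
--
--     Returns:
--         dictionary with all bigrams that occur in the text along with frequencies.
--         Each key should be a tuple of strings of the format (first_token, second_token).
--
--     >>> TestBigramFreqs(getBigramFreqs(preprocess('data/test.txt', mark_ends=True), getVocab('data/glove_vocab.txt')))
--     {1: 70, 2: 3}
--
--     >>> TestBigramFreqs(getBigramFreqs(preprocess('data/test.txt', mark_ends=True), getVocab('data/glove_vocab.txt')), print_non1=True)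
--     {2: [('kitten', 'had'), ('.', '[EOS]'), ('for', 'the')]}
--
--     """
--     bigram ={}
--     for sentence in preprocessed_text:
--         for i in range(len(sentence)-1):
--             first = sentence[i] if sentence[i] in vocab else '[UNK]'
--             second = sentence[i+1] if sentence[i+1] in vocab else '[UNK]'
--             pair = (first, second)
--             bigram[pair] = bigram.get(pair, 0) + 1
--     return bigram
--     pass
-- ===== SOURCE B (Python) =====
-- def getBigramFreqs(preprocessed_text: list, vocab: set) -> dict:
--     # Phase 1: stream out all UNK-normalized adjacent pairs, carrying the
--     # previously normalized token (each token normalized once, no indexing/zip).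
--     pairs = []
--     for sentence in preprocessed_text:
--         prev = None
--         for tok in sentence:
--             cur = tok if tok in vocab else '[UNK]'
--             if prev is not None:
--                 pairs.append((prev, cur))
--             prev = cur
--     # Phase 2: group the occurrences of each pair into a list, then the
--     # frequency of a pair is simply the length of its group.
--     groups = {}
--     for p in pairs:
--         groups.setdefault(p, []).append(p)
--     return {k: len(v) for k, v in groups.items()}
-- ===== Notes on version B (the rewrite author's own statement) =====
-- stated objective: alternative
-- what changed: B streams normalized adjacent pairs with a carried previous token (no indexing, no inline double normalization) and replaces A's incremental integer tally with a group-by: it collects the occurrences of each pair into a list via setdefault/append and then reads each frequency off as the length of its group.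
import Mathlib
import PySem

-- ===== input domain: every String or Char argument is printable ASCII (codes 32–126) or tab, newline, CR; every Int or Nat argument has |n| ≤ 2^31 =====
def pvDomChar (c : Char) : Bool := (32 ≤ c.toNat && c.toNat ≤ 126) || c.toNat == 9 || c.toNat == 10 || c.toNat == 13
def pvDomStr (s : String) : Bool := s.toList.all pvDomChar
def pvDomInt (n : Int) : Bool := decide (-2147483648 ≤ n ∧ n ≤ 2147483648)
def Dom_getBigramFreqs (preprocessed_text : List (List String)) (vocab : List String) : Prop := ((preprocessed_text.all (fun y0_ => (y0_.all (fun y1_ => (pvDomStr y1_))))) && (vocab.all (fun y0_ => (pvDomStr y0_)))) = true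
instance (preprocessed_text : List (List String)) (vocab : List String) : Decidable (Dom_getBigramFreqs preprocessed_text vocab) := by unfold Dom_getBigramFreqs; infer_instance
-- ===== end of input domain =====

-- B streams UNK-normalized adjacent pairs with a carried previous token, groups occurrences of each pair into a list and reads frequencies off as group lengths; alternative decomposition, not claimed faster.


-- ===== PORT A =====
def getBigramFreqs (preprocessed_text : List (List String)) (vocab : List String) : List (String × String × Int) :=
  (preprocessed_text.foldl (fun bigram sentence =>
      (PySem.List.pyRange 0 ((sentence.length : Int) - 1) 1).foldl (fun bigram i =>
        let first := if PySem.List.pyGetD sentence i "" ∈ vocab then PySem.List.pyGetD sentence i "" else "[UNK]"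
        let second := if PySem.List.pyGetD sentence (i + 1) "" ∈ vocab then PySem.List.pyGetD sentence (i + 1) "" else "[UNK]"
        bigram.insert (first, second) (bigram.getD (first, second) 0 + 1)) bigram)
    (PySem.Dict.empty : PySem.Dict (String × String) Int)).items.map (fun p => (p.1.1, p.1.2, p.2))

-- ===== PORT B =====
def getBigramFreqs_alt (preprocessed_text : List (List String)) (vocab : List String) : List (String × String × Int) :=
  let pairs := preprocessed_text.foldl (fun acc sentence =>
      (sentence.foldl (fun (st : List (String × String) × Option String) tok =>
          let cur := if tok ∈ vocab then tok else "[UNK]"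
          (match st.2 with
           | some prev => st.1 ++ [(prev, cur)]
           | none => st.1, some cur))
        (acc, none)).1) ([] : List (String × String))
  let groups := pairs.foldl
      (fun (d : PySem.Dict (String × String) (List (String × String))) p =>
        d.modify p [] (fun l => l ++ [p]))
      PySem.Dict.empty
  (groups.items.foldl
      (fun (d : PySem.Dict (String × String) Int) kv => d.insert kv.1 ((kv.2.length : Int)))
      PySem.Dict.empty).items.map (fun p => (p.1.1, p.1.2, p.2))

-- ===== PRECONDITION & SPEC =====
def Spec_getBigramFreqs (preprocessed_text : List (List String)) (vocab : List String) (out : List (String × String × Int)) : Prop := out = getBigramFreqs_alt preprocessed_text vocab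
instance (preprocessed_text : List (List String)) (vocab : List String) (out : List (String × String × Int)) : Decidable (Spec_getBigramFreqs preprocessed_text vocab out) := by unfold Spec_getBigramFreqs; infer_instance

-- ===== CLAIM (what is proved, stated in full; the proofs are below) =====
def Claim_equal_getBigramFreqs : Prop := ∀ (preprocessed_text : List (List String)) (vocab : List String), Dom_getBigramFreqs preprocessed_text vocab → Spec_getBigramFreqs preprocessed_text vocab (getBigramFreqs preprocessed_text vocab)

-- ===== LEMMAS AND PROOFS =====

-- The per-sentence pair list seen through A's index loop equals the zip of the mapped list with its tail.
theorem pv_range_pairs_eq_zip (s : List String) (vocab : List String) :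
    (PySem.List.pyRange 0 ((s.length : Int) - 1) 1).map (fun i =>
        ((if PySem.List.pyGetD s i "" ∈ vocab then PySem.List.pyGetD s i "" else "[UNK]"),
         (if PySem.List.pyGetD s (i + 1) "" ∈ vocab then PySem.List.pyGetD s (i + 1) "" else "[UNK]")))
    = (s.map (fun tok => if tok ∈ vocab then tok else "[UNK]")).zip
        ((s.map (fun tok => if tok ∈ vocab then tok else "[UNK]")).drop 1) := by
  apply List.ext_getElem
  · simp [PySem.List.length_pyRange_one]
  · intro k h1 h2
    have hlen : k + 1 < s.length := by
      simp [PySem.List.length_pyRange_one] at h1; omega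
    have hk : k < s.length := by omega
    have e1 : PySem.List.pyGetD s ((k : Nat) : Int) "" = s[k] := by
      rw [PySem.List.pyGetD_natCast, List.getD_eq_getElem?_getD, List.getElem?_eq_getElem hk,
        Option.getD_some]
    have e2 : PySem.List.pyGetD s (((k : Nat) : Int) + 1) "" = s[k + 1] := by
      rw [show ((k : Nat) : Int) + 1 = (((k + 1 : Nat)) : Int) by push_cast; ring,
        PySem.List.pyGetD_natCast, List.getD_eq_getElem?_getD, List.getElem?_eq_getElem hlen,
        Option.getD_some]
    simp only [List.getElem_map, PySem.List.getElem_pyRange_one, List.getElem_zip,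
      List.getElem_drop, zero_add]
    rw [e1, e2]
    have h3 : 1 + k = k + 1 := by omega
    simp [h3]

-- B's prev-carry fold from a 'some p' carry: emits acc ++ pairs of p followed by the mapped tokens.
theorem pv_carry_some (vocab : List String) : ∀ (xs : List String) (acc : List (String × String)) (p : String),
    (xs.foldl (fun (st : List (String × String) × Option String) tok =>
        let cur := if tok ∈ vocab then tok else "[UNK]"
        (match st.2 with
         | some prev => st.1 ++ [(prev, cur)]
         | none => st.1, some cur)) (acc, some p)).1
      = acc ++ (p :: xs.map (fun tok => if tok ∈ vocab then tok else "[UNK]")).zip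
          (xs.map (fun tok => if tok ∈ vocab then tok else "[UNK]")) := by
  intro xs
  induction xs with
  | nil => intro acc p; simp
  | cons x xs ih =>
    intro acc p
    simp only [List.foldl_cons, List.map_cons, List.zip_cons_cons]
    rw [ih]
    simp

-- B's prev-carry fold from the 'none' start produces acc ++ adjacent pairs of the mapped list.
theorem pv_carry_none (s : List String) (vocab : List String) (acc : List (String × String)) :
    (s.foldl (fun (st : List (String × String) × Option String) tok =>
        let cur := if tok ∈ vocab then tok else "[UNK]"
        (match st.2 with
         | some prev => st.1 ++ [(prev, cur)]
         | none => st.1, some cur)) (acc, none)).1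
      = acc ++ (s.map (fun tok => if tok ∈ vocab then tok else "[UNK]")).zip
          ((s.map (fun tok => if tok ∈ vocab then tok else "[UNK]")).drop 1) := by
  cases s with
  | nil => simp
  | cons x xs =>
    simp only [List.foldl_cons, List.map_cons, List.drop_succ_cons, List.drop_zero]
    exact pv_carry_some vocab xs acc _

-- Fold a counting step over a nested loop = fold it over the flat concatenation.
theorem pv_foldl_nested_eq_flat {α β : Type} (g : α → List β)
    (step : PySem.Dict β Int → β → PySem.Dict β Int) [BEq β] :
    ∀ (l : List α) (d : PySem.Dict β Int),
      l.foldl (fun d s => (g s).foldl step d) d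
        = (l.foldl (fun acc s => acc ++ g s) []).foldl step d := by
  intro l
  induction l with
  | nil => intro d; simp
  | cons s t ih =>
    intro d
    simp only [List.foldl_cons]
    rw [ih, PySem.List.foldl_append_eq_flatMap, PySem.List.foldl_append_eq_flatMap,
      List.nil_append, List.nil_append, List.foldl_append]

-- ===== VERDICT (by name: the statement is the Claim_ definition above) =====
theorem getBigramFreqs_spec : Claim_equal_getBigramFreqs := by
  intro pt vocab _
  unfold Spec_getBigramFreqs getBigramFreqs getBigramFreqs_alt
  -- B's streamed pair list is the flat concatenation of per-sentence zips.
  have hpairs : pt.foldl (fun acc sentence =>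
      (sentence.foldl (fun (st : List (String × String) × Option String) tok =>
          let cur := if tok ∈ vocab then tok else "[UNK]"
          (match st.2 with
           | some prev => st.1 ++ [(prev, cur)]
           | none => st.1, some cur))
        (acc, none)).1) ([] : List (String × String))
      = pt.foldl (fun acc s =>
          acc ++ (s.map (fun tok => if tok ∈ vocab then tok else "[UNK]")).zip
            ((s.map (fun tok => if tok ∈ vocab then tok else "[UNK]")).drop 1)) [] := by
    apply PySem.List.foldl_congr_mem
    intro acc s _
    exact pv_carry_none s vocab acc
  rw [hpairs]
  congr 1
  set pairs := pt.foldl (fun acc s =>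
      acc ++ (s.map (fun tok => if tok ∈ vocab then tok else "[UNK]")).zip
        ((s.map (fun tok => if tok ∈ vocab then tok else "[UNK]")).drop 1)) []
    with hp
  -- A's nested incremental tally is Counter(pairs).
  have hA : (pt.foldl (fun bigram sentence =>
      (PySem.List.pyRange 0 ((sentence.length : Int) - 1) 1).foldl (fun bigram i =>
        let first := if PySem.List.pyGetD sentence i "" ∈ vocab then PySem.List.pyGetD sentence i "" else "[UNK]"
        let second := if PySem.List.pyGetD sentence (i + 1) "" ∈ vocab then PySem.List.pyGetD sentence (i + 1) "" else "[UNK]"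
        bigram.insert (first, second) (bigram.getD (first, second) 0 + 1)) bigram)
    (PySem.Dict.empty : PySem.Dict (String × String) Int)).items
      = (PySem.Dict.counter pairs).items := by
    have h1 : (pt.foldl (fun (bigram : PySem.Dict (String × String) Int) sentence =>
        ((PySem.List.pyRange 0 ((sentence.length : Int) - 1) 1).map (fun i =>
          ((if PySem.List.pyGetD sentence i "" ∈ vocab then PySem.List.pyGetD sentence i "" else "[UNK]"),
           (if PySem.List.pyGetD sentence (i + 1) "" ∈ vocab then PySem.List.pyGetD sentence (i + 1) "" else "[UNK]")))).foldl
          (fun d p => d.insert p (d.getD p 0 + 1)) bigram) PySem.Dict.empty).items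
        = (PySem.Dict.counter pairs).items := by
      have h2 := pv_foldl_nested_eq_flat
        (fun s => (s.map (fun tok => if tok ∈ vocab then tok else "[UNK]")).zip
          ((s.map (fun tok => if tok ∈ vocab then tok else "[UNK]")).drop 1))
        (fun (d : PySem.Dict (String × String) Int) p => d.insert p (d.getD p 0 + 1)) pt
        PySem.Dict.empty
      have h3 : pt.foldl (fun (bigram : PySem.Dict (String × String) Int) sentence =>
          ((PySem.List.pyRange 0 ((sentence.length : Int) - 1) 1).map (fun i =>
            ((if PySem.List.pyGetD sentence i "" ∈ vocab then PySem.List.pyGetD sentence i "" else "[UNK]"),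
             (if PySem.List.pyGetD sentence (i + 1) "" ∈ vocab then PySem.List.pyGetD sentence (i + 1) "" else "[UNK]")))).foldl
            (fun d p => d.insert p (d.getD p 0 + 1)) bigram) PySem.Dict.empty
          = pt.foldl (fun (bigram : PySem.Dict (String × String) Int) s =>
            ((s.map (fun tok => if tok ∈ vocab then tok else "[UNK]")).zip
              ((s.map (fun tok => if tok ∈ vocab then tok else "[UNK]")).drop 1)).foldl
              (fun d p => d.insert p (d.getD p 0 + 1)) bigram) PySem.Dict.empty := by
        apply PySem.List.foldl_congr_mem
        intro d s _
        rw [pv_range_pairs_eq_zip s vocab]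
      rw [h3, h2, ← hp, PySem.Dict.foldl_insert_getD_add_one_eq_counter]
    rw [← h1]
    congr 1
    apply PySem.List.foldl_congr_mem
    intro bigram sentence _
    rw [List.foldl_map]
  rw [hA, PySem.Dict.items_counter]
  -- B's group-by loop, then the length comprehension, builds the same items list.
  have hkeys : (pairs.foldl
      (fun (d : PySem.Dict (String × String) (List (String × String))) p =>
        d.modify p [] (fun l => l ++ [p]))
      PySem.Dict.empty).keys = PySem.Set.ofList pairs := by
    rw [PySem.Dict.keys_foldl_modify]
    simp [PySem.Set.update_nil_left]
  have hnodup : (pairs.foldl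
      (fun (d : PySem.Dict (String × String) (List (String × String))) p =>
        d.modify p [] (fun l => l ++ [p]))
      PySem.Dict.empty).keys.Nodup := by
    rw [hkeys]; exact PySem.Set.nodup_ofList pairs
  have hgetD : ∀ c, (pairs.foldl
      (fun (d : PySem.Dict (String × String) (List (String × String))) p =>
        d.modify p [] (fun l => l ++ [p]))
      PySem.Dict.empty).getD c [] = pairs.filter (fun p => p == c) := by
    intro c
    have hm : pairs.foldl
        (fun (d : PySem.Dict (String × String) (List (String × String))) p =>
          d.modify p [] (fun l => l ++ [p]))
        PySem.Dict.empty
        = (pairs.map (fun p => (p, p))).foldl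
            (fun (d : PySem.Dict (String × String) (List (String × String))) q =>
              d.modify q.1 [] (fun l => l ++ [q.2]))
            PySem.Dict.empty := by
      rw [List.foldl_map]
    rw [hm, PySem.Dict.getD_foldl_modify_append]
    simp [List.filter_map, Function.comp_def]
  have hitems : (pairs.foldl
      (fun (d : PySem.Dict (String × String) (List (String × String))) p =>
        d.modify p [] (fun l => l ++ [p]))
      PySem.Dict.empty).items
      = (PySem.Set.ofList pairs).map (fun k => (k, pairs.filter (fun p => p == k))) := by
    rw [PySem.Dict.items_eq_map_keys _ hnodup []]
    rw [hkeys]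
    exact List.map_congr_left (fun k _ => by rw [hgetD k])
  have hB : (((pairs.foldl
      (fun (d : PySem.Dict (String × String) (List (String × String))) p =>
        d.modify p [] (fun l => l ++ [p]))
      PySem.Dict.empty).items).foldl
      (fun (d : PySem.Dict (String × String) Int) kv => d.insert kv.1 ((kv.2.length : Int)))
      PySem.Dict.empty).items
      = (PySem.Set.ofList pairs).map (fun k => (k, (pairs.count k : Int))) := by
    rw [hitems]
    have := PySem.Dict.items_foldl_insert_fresh
      (l := (PySem.Set.ofList pairs).map (fun k => (k, pairs.filter (fun p => p == k))))
      (k := fun kv => kv.1) (v := fun kv => ((kv.2.length : Nat) : Int))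
      (d := (PySem.Dict.empty : PySem.Dict (String × String) Int))
      (by intro a _; exact PySem.Dict.contains_empty _)
      (by simp [Function.comp_def])
    rw [this]
    simp [Function.comp_def, List.count_eq_length_filter, PySem.Dict.empty]
  rw [hB]
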